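-- pv_equiv track=rewrite | github.com/alekseik1/python_mipt_study | recursion/6.py | do_motion
-- ===== SOURCE A (Python) =====
-- def do_motion(n, b):
--     if n == 0:
--         return b
--     res = []
--     k = 0
--     j = 0
--
--     for i in range(len(b)*2+1):
--         if i % 2 == 0:
--             if k == 0:
--                 res.append(k)
--                 k = 1
--             else:
--                 res.append(k)
--                 k = 0
--         else:
--             res.append(b[j])
--             j += 1
--     return do_motion(n-1, res)
-- ===== SOURCE B (Python) =====
-- def do_motion(n, b):
--     res = b
--     for _ in range(n):
--         nxt = []
--         for j, x in enumerate(res):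
--             nxt.append(j % 2)
--             nxt.append(x)
--         nxt.append(len(res) % 2)
--         res = nxt
--     return res
-- ===== Notes on version B (the rewrite author's own statement) =====
-- stated objective: simpler
-- what changed: Replaces the recursion and the toggle-variable index loop over range(2*len+1) by an iterative for _ in range(n) loop whose level is built with enumerate, emitting j%2 and b[j] per element plus a final len%2 bit.
import Mathlib
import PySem

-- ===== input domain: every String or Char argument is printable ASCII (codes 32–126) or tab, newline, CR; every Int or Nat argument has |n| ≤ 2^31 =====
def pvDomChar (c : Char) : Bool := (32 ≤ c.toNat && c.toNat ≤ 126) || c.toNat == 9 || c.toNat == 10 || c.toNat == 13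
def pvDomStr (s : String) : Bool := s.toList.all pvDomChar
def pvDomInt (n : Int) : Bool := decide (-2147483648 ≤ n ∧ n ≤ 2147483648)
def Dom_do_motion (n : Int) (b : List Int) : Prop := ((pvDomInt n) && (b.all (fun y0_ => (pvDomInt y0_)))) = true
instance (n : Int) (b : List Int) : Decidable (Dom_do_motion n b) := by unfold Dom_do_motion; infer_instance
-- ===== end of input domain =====

-- B replaces A's recursion and toggle-variable index loop by an iterative
-- 'for _ in range(n)' loop whose level is built with enumerate (bit j%2 before
-- each element, final bit len%2); objective: simpler.


-- ===== PORT A =====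
-- the loop body of A's for i in range(len(b)*2+1), state (res, k, j)
def stepA (b : List Int) (st : List Int × Int × Int) (i : Int) : List Int × Int × Int :=
  let res := st.1
  let k := st.2.1
  let j := st.2.2
  if PySem.Int.mod i 2 = 0 then
    if k = 0 then (res ++ [k], 1, j) else (res ++ [k], 0, j)
  else
    (res ++ [PySem.List.pyGetD b j 0], k, j + 1)

def do_motion_level (b : List Int) : List Int :=
  ((PySem.List.pyRange 0 ((b.length : Int) * 2 + 1) 1).foldl (stepA b) ([], 0, 0)).1

def do_motion (n : Int) (b : List Int) : List Int :=
  if n = 0 then b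
  else if n < 0 then b  -- totalization guard only: the Python A recurses forever here (outside Pre_)
  else do_motion (n - 1) (do_motion_level b)
termination_by n.toNat
decreasing_by omega

-- ===== PORT B =====
-- one interleaving level: enumerate-driven, bit j%2 before each element, final bit len%2
def do_motion_alt_level (res : List Int) : List Int :=
  ((PySem.List.enumerate res 0).foldl
      (fun nxt p => nxt ++ [PySem.Int.mod p.1 2, p.2]) [])
    ++ [PySem.Int.mod (res.length : Int) 2]

def do_motion_alt (n : Int) (b : List Int) : List Int :=
  (PySem.List.pyRange 0 n 1).foldl (fun res _ => do_motion_alt_level res) b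

-- ===== PRECONDITION & SPEC =====
-- Pre_ excludes n < 0, on which the Python A recurses forever and raises RecursionError.
def Pre_do_motion (n : Int) (b : List Int) : Prop := 0 ≤ n
instance (n : Int) (b : List Int) : Decidable (Pre_do_motion n b) := by unfold Pre_do_motion; infer_instance
def pvWitness_do_motion : Int × List Int := (2, [3, -1])

def Spec_do_motion (n : Int) (b : List Int) (out : List Int) : Prop := out = do_motion_alt n b
instance (n : Int) (b : List Int) (out : List Int) : Decidable (Spec_do_motion n b out) := by unfold Spec_do_motion; infer_instance

-- ===== CLAIM (what is proved, stated in full; the proofs are below) =====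
def Claim_equal_do_motion : Prop := ∀ (n : Int) (b : List Int), Dom_do_motion n b → Pre_do_motion n b → Spec_do_motion n b (do_motion n b)

-- ===== LEMMAS AND PROOFS =====

-- the common mathematical shape of one level
def interleave : List Int → Int → List Int
  | [], k => [k]
  | x :: xs, k => k :: x :: interleave xs (1 - k)

theorem A_go (xs : List Int) : ∀ (front res : List Int),
    ((PySem.List.pyRange (2 * (front.length : Int))
        (2 * ((front.length : Int) + xs.length) + 1) 1).foldl
      (stepA (front ++ xs)) (res, PySem.Int.mod (front.length : Int) 2, (front.length : Int))).1
    = res ++ interleave xs (PySem.Int.mod (front.length : Int) 2) := by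
  induction xs with
  | nil =>
    intro front res
    simp only [List.length_nil, Nat.cast_zero, add_zero, List.append_nil]
    rw [PySem.List.pyRange_one_cons (by omega), PySem.List.pyRange_one_eq_nil (by omega)]
    simp only [List.foldl_cons, List.foldl_nil]
    have heven : PySem.Int.mod (2 * (front.length : Int)) 2 = 0 := by
      rw [PySem.Int.mod_eq_emod_of_pos (b := 2) (by omega)]; omega
    simp only [stepA, heven, if_pos]
    split_ifs <;> simp [interleave]
  | cons x t ih =>
    intro front res
    have hlen : ((List.length (x :: t) : Int)) = (t.length : Int) + 1 := by
      simp [List.length_cons]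
    rw [hlen]
    rw [PySem.List.pyRange_one_cons (by omega), PySem.List.pyRange_one_cons (by omega)]
    simp only [List.foldl_cons]
    have heven : PySem.Int.mod (2 * (front.length : Int)) 2 = 0 := by
      rw [PySem.Int.mod_eq_emod_of_pos (b := 2) (by omega)]; omega
    have hodd : ¬ PySem.Int.mod (2 * (front.length : Int) + 1) 2 = 0 := by
      rw [PySem.Int.mod_eq_emod_of_pos (b := 2) (by omega)]; omega
    have hget : PySem.List.pyGetD (front ++ x :: t) ((front.length : Nat) : Int) 0 = x := by
      rw [PySem.List.pyGetD_natCast]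
      simp [List.getD, List.getElem?_append_right]
    have hk : PySem.Int.mod (front.length : Int) 2 = 0 ∨ PySem.Int.mod (front.length : Int) 2 = 1 := by
      rw [PySem.Int.mod_eq_emod_of_pos (b := 2) (by omega)]; omega
    have hflip : PySem.Int.mod ((front.length : Int) + 1) 2 = 1 - PySem.Int.mod (front.length : Int) 2 := by
      rw [PySem.Int.mod_eq_emod_of_pos (b := 2) (by omega),
          PySem.Int.mod_eq_emod_of_pos (b := 2) (by omega)]
      omega
    have hE : 2 * ((front.length : Int) + ((t.length : Int) + 1)) + 1
        = 2 * (((front ++ [x]).length : Int) + (t.length : Int)) + 1 := by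
      simp [List.length_append]; omega
    have hstart : 2 * (front.length : Int) + 1 + 1 = 2 * (((front ++ [x]).length : Int)) := by
      simp [List.length_append]; omega
    have happ : front ++ x :: t = (front ++ [x]) ++ t := by simp
    have ihx := ih (front ++ [x]) (res ++ [PySem.Int.mod (front.length : Int) 2, x])
    simp only [List.length_append, List.length_cons, List.length_nil, Nat.cast_add,
      Nat.cast_zero, Nat.cast_one, zero_add] at ihx
    have e1 : 2 * (front.length : Int) + 1 + 1 = 2 * ((front.length : Int) + 1) := by ring
    have e2 : 2 * ((front.length : Int) + ((t.length : Int) + 1)) + 1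
        = 2 * ((front.length : Int) + 1 + (t.length : Int)) + 1 := by ring
    have happ : front ++ x :: t = (front ++ [x]) ++ t := by simp
    rcases hk with hk0 | hk0 <;>
    · rw [hk0] at ihx hflip ⊢
      simp only [stepA, heven, hodd, hk0, if_true, ite_true, if_false, ite_false, hget,
        reduceIte, if_pos, if_neg] at *
      rw [e1, e2] at *
      rw [happ] at *
      simp only [hflip] at ihx
      norm_num at ihx ⊢
      try rw [ihx]
      simp [interleave]
theorem levelA_eq (b : List Int) : do_motion_level b = interleave b 0 := by
  have h := A_go b [] []
  simp only [List.length_nil, Nat.cast_zero, mul_zero, zero_add, List.nil_append] at h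
  have hm : PySem.Int.mod (0 : Int) 2 = 0 := by decide
  rw [hm] at h
  unfold do_motion_level
  have e : (b.length : Int) * 2 + 1 = 2 * (b.length : Int) + 1 := by ring
  rw [e]
  simpa using h

theorem B_go (xs : List Int) : ∀ (s : Nat) (acc : List Int),
    ((PySem.List.enumerate xs (s : Int)).foldl
        (fun nxt p => nxt ++ [PySem.Int.mod p.1 2, p.2]) acc)
      ++ [PySem.Int.mod ((s : Int) + xs.length) 2]
    = acc ++ interleave xs (PySem.Int.mod (s : Int) 2) := by
  induction xs with
  | nil => intro s acc; simp [PySem.List.enumerate, interleave]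
  | cons x t ih =>
    intro s acc
    rw [PySem.List.enumerate_cons]
    simp only [List.foldl_cons]
    have hcast : (s : Int) + 1 = ((s + 1 : Nat) : Int) := by omega
    have step := ih (s + 1) (acc ++ [PySem.Int.mod (s : Int) 2, x])
    have hlen : (s : Int) + (List.length (x :: t) : Int) = ((s + 1 : Nat) : Int) + (t.length : Int) := by
      simp [List.length_cons]; omega
    rw [hlen, hcast, step]
    have hmod : PySem.Int.mod (((s + 1 : Nat)) : Int) 2 = 1 - PySem.Int.mod (s : Int) 2 := by
      rw [PySem.Int.mod_eq_emod_of_pos (b := 2) (by omega), PySem.Int.mod_eq_emod_of_pos (b := 2) (by omega)]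
      omega
    rw [hmod]
    simp [interleave]

theorem levelB_eq (b : List Int) : do_motion_alt_level b = interleave b 0 := by
  have h := B_go b 0 []
  simp only [Nat.cast_zero, zero_add] at h
  have hm : PySem.Int.mod 0 2 = 0 := by decide
  rw [hm] at h
  unfold do_motion_alt_level
  simpa using h

theorem A_iter (m : Nat) : ∀ b : List Int, do_motion (m : Int) b = do_motion_level^[m] b := by
  induction m with
  | zero => intro b; simp [do_motion]
  | succ k ih =>
    intro b
    rw [do_motion]
    have h1 : ¬ ((k + 1 : Nat) : Int) = 0 := by omega
    have h2 : ¬ ((k + 1 : Nat) : Int) < 0 := by omega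
    rw [if_neg h1, if_neg h2]
    have : ((k + 1 : Nat) : Int) - 1 = (k : Int) := by omega
    rw [this, ih, Function.iterate_succ_apply]

theorem B_iter (m : Nat) : ∀ b : List Int,
    (PySem.List.pyRange 0 (m : Int) 1).foldl (fun res _ => do_motion_alt_level res) b
      = do_motion_alt_level^[m] b := by
  induction m with
  | zero => intro b; simp [PySem.List.pyRange_one_eq_nil]
  | succ k ih =>
    intro b
    have : ((k + 1 : Nat) : Int) = (k : Int) + 1 := by omega
    rw [this, PySem.List.pyRange_one_succ_right (by omega)]
    rw [List.foldl_append, ih, Function.iterate_succ_apply']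
    simp

-- ===== VERDICT (by name: the statement is the Claim_ definition above) =====
theorem do_motion_spec : Claim_equal_do_motion := by
  intro n b _ hpre
  have h0 : 0 ≤ n := hpre
  unfold Spec_do_motion do_motion_alt
  have hn : n = (n.toNat : Int) := by omega
  rw [hn, A_iter, B_iter]
  have : do_motion_level = do_motion_alt_level := by
    funext b; rw [levelA_eq, levelB_eq]
  rw [this]
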